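-- pv_equiv track=rewrite | github.com/xyc21/he-mgwr | hemgwr/kernel.py | distribute_data_evenly_with_indices
-- ===== SOURCE A (Python) =====
-- def distribute_data_evenly_with_indices(total_data, num_threads):
--
--     base_data = total_data // num_threads
--
--
--     remainder = total_data % num_threads
--
--
--     data_size_per_gpu_list = [base_data + 1 if i < remainder else base_data for i in range(num_threads)]
--
--
--     start_indices = [0] * num_threads
--     for i in range(1, num_threads):
--         start_indices[i] = start_indices[i - 1] + data_size_per_gpu_list[i - 1]
--
--     return data_size_per_gpu_list, start_indices
-- ===== SOURCE B (Python) =====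
-- def distribute_data_evenly_with_indices(total_data, num_threads):
--     base = total_data // num_threads
--     remainder = total_data % num_threads
--     boundaries = [i * base + min(i, remainder) for i in range(num_threads + 1)]
--     sizes = [b - a for a, b in zip(boundaries, boundaries[1:])]
--     return sizes, boundaries[:-1]
-- ===== Notes on version B (the rewrite author's own statement) =====
-- stated objective: alternative
-- what changed: Instead of an if-comprehension for sizes plus a sequential prefix-sum loop mutating start_indices, B computes one closed-form list of n+1 partition boundaries and derives sizes as pairwise differences (zip) and starts as the boundaries without the last.
import Mathlib
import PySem

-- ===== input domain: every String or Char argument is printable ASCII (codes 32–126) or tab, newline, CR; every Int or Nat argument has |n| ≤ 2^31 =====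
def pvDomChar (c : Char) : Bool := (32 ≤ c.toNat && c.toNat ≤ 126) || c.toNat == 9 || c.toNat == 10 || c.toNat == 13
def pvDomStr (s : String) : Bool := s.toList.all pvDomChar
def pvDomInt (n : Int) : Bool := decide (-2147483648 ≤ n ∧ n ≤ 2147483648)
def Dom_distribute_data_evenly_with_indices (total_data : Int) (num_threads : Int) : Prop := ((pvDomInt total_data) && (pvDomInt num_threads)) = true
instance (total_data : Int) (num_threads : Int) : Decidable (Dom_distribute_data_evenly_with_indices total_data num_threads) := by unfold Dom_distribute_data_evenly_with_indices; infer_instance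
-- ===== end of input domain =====

-- B builds one boundary list of n+1 closed-form partition points and derives sizes as pairwise
-- differences and starts as the boundaries minus the last — replacing A's if-comprehension and
-- sequential prefix-sum loop (alternative decomposition, same cost).

-- ===== PORT A =====
def distribute_data_evenly_with_indices (total_data : Int) (num_threads : Int) : List Int × List Int :=
  let base_data := PySem.Int.floordiv total_data num_threads
  let remainder := PySem.Int.mod total_data num_threads
  let data_size_per_gpu_list :=
    (PySem.List.pyRange 0 num_threads 1).map
      (fun i => if i < remainder then base_data + 1 else base_data)
  -- [0] * num_threads (a negative count gives the empty list, as in Python)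
  let start0 : List Int := List.replicate num_threads.toNat 0
  -- for i in range(1, num_threads): start_indices[i] = start_indices[i-1] + data_size_per_gpu_list[i-1]
  -- (indices are always in range in this loop, so the total pySetD/pyGetD forms are exact)
  let start_indices :=
    (PySem.List.pyRange 1 num_threads 1).foldl
      (fun s i =>
        PySem.List.pySetD s i
          (PySem.List.pyGetD s (i - 1) 0 + PySem.List.pyGetD data_size_per_gpu_list (i - 1) 0))
      start0
  (data_size_per_gpu_list, start_indices)

-- ===== PORT B =====
def distribute_data_evenly_with_indices_alt (total_data : Int) (num_threads : Int) : List Int × List Int :=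
  let base := PySem.Int.floordiv total_data num_threads
  let remainder := PySem.Int.mod total_data num_threads
  let boundaries :=
    (PySem.List.pyRange 0 (num_threads + 1) 1).map (fun i => i * base + min i remainder)
  -- [b - a for a, b in zip(boundaries, boundaries[1:])]
  let sizes :=
    (boundaries.zip (PySem.List.slice boundaries (some 1) none)).map (fun p => p.2 - p.1)
  (sizes, PySem.List.slice boundaries none (some (-1)))

-- ===== PRECONDITION & SPEC =====
-- Pre_ excludes exactly num_threads = 0, where Python A raises ZeroDivisionError.
def Pre_distribute_data_evenly_with_indices (total_data : Int) (num_threads : Int) : Prop :=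
  num_threads ≠ 0
instance (total_data : Int) (num_threads : Int) : Decidable (Pre_distribute_data_evenly_with_indices total_data num_threads) := by unfold Pre_distribute_data_evenly_with_indices; infer_instance
def pvWitness_distribute_data_evenly_with_indices : Int × Int := (10, 3)

def Spec_distribute_data_evenly_with_indices (total_data : Int) (num_threads : Int) (out : List Int × List Int) : Prop := out = distribute_data_evenly_with_indices_alt total_data num_threads
instance (total_data : Int) (num_threads : Int) (out : List Int × List Int) : Decidable (Spec_distribute_data_evenly_with_indices total_data num_threads out) := by unfold Spec_distribute_data_evenly_with_indices; infer_instance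

-- ===== CLAIM (what is proved, stated in full; the proofs are below) =====
def Claim_equal_distribute_data_evenly_with_indices : Prop := ∀ (total_data : Int) (num_threads : Int), Dom_distribute_data_evenly_with_indices total_data num_threads → Pre_distribute_data_evenly_with_indices total_data num_threads → Spec_distribute_data_evenly_with_indices total_data num_threads (distribute_data_evenly_with_indices total_data num_threads)

-- ===== LEMMAS AND PROOFS =====

-- one step of the closed form: consecutive boundary difference is A's size entry
lemma pv_cf_step (base rem j : Int) (_hj : 0 ≤ j) :
    (j * base + min j rem) + (if j < rem then base + 1 else base)
      = (j + 1) * base + min (j + 1) rem := by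
  rcases lt_or_ge j rem with h | h
  · rw [if_pos h, min_eq_left (by omega), min_eq_left (by omega)]; ring
  · rw [if_neg (by omega), min_eq_right (by omega), min_eq_right (by omega)]; ring

-- invariant of A's prefix-sum loop: after the iterations i = 1 .. k-1, the
-- first k entries carry the closed form and the rest are still 0
lemma pv_loop_invariant (base rem : Int) (hrem : 0 ≤ rem) (n : Nat) (k : Nat)
    (hk1 : 1 ≤ k) (hkn : k ≤ n) :
    (PySem.List.pyRange 1 (k : Int) 1).foldl
      (fun s i =>
        PySem.List.pySetD s i
          (PySem.List.pyGetD s (i - 1) 0 +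
           PySem.List.pyGetD
             ((PySem.List.pyRange 0 (n : Int) 1).map
               (fun i => if i < rem then base + 1 else base)) (i - 1) 0))
      (List.replicate n 0)
    = (List.range n).map
        (fun (i : Nat) => if i < k then (i : Int) * base + min (i : Int) rem else 0) := by
  induction k, hk1 using Nat.le_induction with
  | base =>
    rw [show PySem.List.pyRange 1 ((1 : Nat) : Int) 1 = [] from
      PySem.List.pyRange_one_eq_nil (by norm_num)]
    simp only [List.foldl_nil]
    apply List.ext_getElem
    · simp
    · intro i h1 h2
      simp only [List.getElem_map, List.getElem_range, List.getElem_replicate]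
      by_cases h0 : i < 1
      · have hi0 : i = 0 := by omega
        subst hi0
        simp [min_eq_left hrem]
      · simp [h0]
  | succ k hk1 ih =>
    have hkn' : k ≤ n := by omega
    have hcast : ((k + 1 : Nat) : Int) = (k : Int) + 1 := by push_cast; ring
    rw [hcast, PySem.List.pyRange_one_succ_right (by exact_mod_cast hk1),
        List.foldl_append, ih hkn']
    simp only [List.foldl_cons, List.foldl_nil]
    have hidx : (k : Int) - 1 = ((k - 1 : Nat) : Int) := by omega
    rw [hidx]
    have hread1 :
        PySem.List.pyGetD
          ((List.range n).map
            (fun (i : Nat) => if i < k then (i : Int) * base + min (i : Int) rem else 0))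
          ((k - 1 : Nat) : Int) 0
        = ((k - 1 : Nat) : Int) * base + min ((k - 1 : Nat) : Int) rem := by
      rw [PySem.List.pyGetD_natCast]
      have hlen : k - 1 < ((List.range n).map
          (fun (i : Nat) => if i < k then (i : Int) * base + min (i : Int) rem else 0)).length := by
        simp; omega
      rw [List.getD_eq_getElem _ _ hlen, List.getElem_map, List.getElem_range,
          if_pos (by omega)]
    have hread2 :
        PySem.List.pyGetD
          ((PySem.List.pyRange 0 (n : Int) 1).map
            (fun i => if i < rem then base + 1 else base)) ((k - 1 : Nat) : Int) 0
        = (if ((k - 1 : Nat) : Int) < rem then base + 1 else base) := by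
      exact PySem.List.pyGetD_map_pyRange_of_nonneg _ _ _ _ (by positivity) (by exact_mod_cast by omega)
    rw [hread1, hread2]
    have hval : (((k - 1 : Nat) : Int) * base + min ((k - 1 : Nat) : Int) rem) +
        (if ((k - 1 : Nat) : Int) < rem then base + 1 else base)
        = (k : Int) * base + min (k : Int) rem := by
      have hc : ((k - 1 : Nat) : Int) + 1 = (k : Int) := by omega
      rw [pv_cf_step base rem ((k - 1 : Nat) : Int) (by positivity), hc]
    rw [hval, PySem.List.pySetD_natCast]
    apply List.ext_getElem
    · simp
    · intro i h1 h2
      simp only [List.length_set, List.length_map, List.length_range] at h1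
      rw [List.getElem_set]
      simp only [List.getElem_map, List.getElem_range]
      by_cases hik : k = i
      · subst hik; simp
      · rw [if_neg hik]
        by_cases h : i < k
        · rw [if_pos h, if_pos (by omega)]
        · rw [if_neg h, if_neg (by omega)]

-- B's boundary list over Nat range
lemma pv_boundaries_eq (base rem : Int) (n : Nat) :
    (PySem.List.pyRange 0 ((n : Int) + 1) 1).map (fun i => i * base + min i rem)
      = (List.range (n + 1)).map (fun (k : Nat) => (k : Int) * base + min (k : Int) rem) := by
  have h : ((n : Int) + 1) = ((n + 1 : Nat) : Int) := by push_cast; ring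
  rw [h, PySem.List.pyRange_zero_natCast, List.map_map]
  apply List.map_congr_left
  intro k _
  simp

-- A's size list over Nat range
lemma pv_sizes_a_eq (base rem : Int) (n : Nat) :
    (PySem.List.pyRange 0 (n : Int) 1).map (fun i => if i < rem then base + 1 else base)
      = (List.range n).map (fun (k : Nat) => if (k : Int) < rem then base + 1 else base) := by
  rw [PySem.List.pyRange_zero_natCast, List.map_map]
  apply List.map_congr_left
  intro k _
  simp

-- ===== VERDICT (by name: the statement is the Claim_ definition above) =====
theorem distribute_data_evenly_with_indices_spec : Claim_equal_distribute_data_evenly_with_indices := by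
  unfold Claim_equal_distribute_data_evenly_with_indices
  intro t m _ hpre
  unfold Spec_distribute_data_evenly_with_indices
  unfold distribute_data_evenly_with_indices distribute_data_evenly_with_indices_alt
  rcases lt_or_gt_of_ne hpre with hneg | hpos
  · -- num_threads < 0: every range is empty, both sides are ([], [])
    rw [PySem.List.pyRange_one_eq_nil (show m ≤ 0 by omega),
        PySem.List.pyRange_one_eq_nil (show m ≤ 1 by omega),
        PySem.List.pyRange_one_eq_nil (show m + 1 ≤ 0 by omega)]
    simp [Int.toNat_of_nonpos (le_of_lt hneg), PySem.List.slice]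
  · -- num_threads > 0
    have hrem : 0 ≤ PySem.Int.mod t m := PySem.Int.mod_nonneg t hpos
    obtain ⟨n, rfl⟩ : ∃ n : Nat, m = (n : Int) := ⟨m.toNat, (Int.toNat_of_nonneg (by omega)).symm⟩
    have hn1 : 1 ≤ n := by exact_mod_cast hpos
    set base := PySem.Int.floordiv t n with hbase
    set rem := PySem.Int.mod t n with hremdef
    simp only
    rw [Int.toNat_natCast, pv_loop_invariant base rem hrem n n hn1 le_rfl,
        pv_boundaries_eq base rem n, pv_sizes_a_eq base rem n,
        PySem.List.slice_from_one, PySem.List.slice_to_neg_one]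
    set g : Nat → Int := fun (k : Nat) => (k : Int) * base + min (k : Int) rem with hg
    refine Prod.ext ?_ ?_
    · -- sizes
      apply List.ext_getElem
      · simp
      · intro i h1 h2
        simp only [List.length_map, List.length_range] at h1
        have htail : ((List.range (n + 1)).map g).tail = ((List.range n).map (fun k => g (k + 1))) := by
          rw [List.range_succ_eq_map]
          simp [List.map_map]
        simp only [List.getElem_map, List.getElem_zip, htail, List.getElem_range]
        have hstep := pv_cf_step base rem (i : Int) (by positivity)
        have hg1 : g (i + 1) = ((i : Int) + 1) * base + min ((i : Int) + 1) rem := by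
          simp only [hg]; push_cast; ring_nf
        rw [hg1, ← hstep]
        simp [hg]
    · -- starts: A's loop result equals boundaries.dropLast
      rw [show ((List.range (n + 1)).map g).dropLast = (List.range n).map g by
        rw [List.range_succ, List.map_append, List.dropLast_append_of_ne_nil] <;> simp]
      apply List.map_congr_left
      intro i hi
      simp only [List.mem_range] at hi
      simp [hg, hi]
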